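-- pv_equiv track=rewrite | github.com/Ara-ban/foobar-google-challenge | level4/running_with_bunnies_solution.py | solution
-- ===== SOURCE A (Python) =====
-- import itertools
--
-- def solution(time, time_limit):
--     rows = len(time)
--     for k in range(rows):
--         for i in range(rows):
--             for j in range(rows):
--                 if time[i][j] > time[i][k] + time[k][j]:
--                     time[i][j] = time[i][k] + time[k][j]
--     def convert_to_path(perm):
--         perm = list(perm)
--         perm = [0] + perm + [-1]
--         path = list()
--         for i in range(1, len(perm)):
--             path.append((perm[i - 1], perm[i]))
--         return path
--     bunnies=rows-2
--     for i in reversed(range(bunnies + 1)):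
--         for perm in itertools.permutations(range(1, bunnies + 1), i):
--             total_time = 0
--             path = convert_to_path(perm)
--             for start, end in path:
--                 total_time += time[start][end]
--             if total_time <= time_limit:
--                 return sorted(list(i - 1 for i in perm))
--     return ([])
-- ===== SOURCE B (Python) =====
-- import itertools
--
-- def solution(time, time_limit):
--     # Return-value equivalent to A; like A it runs Floyd-Warshall in place on `time`.
--     n = len(time)
--     for k, i, j in itertools.product(range(n), repeat=3):
--         time[i][j] = min(time[i][j], time[i][k] + time[k][j])
--     bunnies = n - 2
--
--     def dfs(last, remaining, spent, need):
--         # depth-first search over lexicographic partial permutations, accumulating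
--         # the cost incrementally instead of rebuilding and re-summing each path
--         if need == 0:
--             if spent + time[last][-1] <= time_limit:
--                 return []
--             return None
--         for idx, b in enumerate(remaining):
--             res = dfs(b, remaining[:idx] + remaining[idx + 1:],
--                       spent + time[last][b], need - 1)
--             if res is not None:
--                 return [b] + res
--         return None
--
--     for size in reversed(range(bunnies + 1)):
--         res = dfs(0, list(range(1, bunnies + 1)), 0, size)
--         if res is not None:
--             return sorted(b - 1 for b in res)
--     return []
-- ===== Notes on version B (the rewrite author's own statement) =====
-- stated objective: alternative
-- what changed: B replaces A's generate-every-permutation-then-rebuild-and-resum-its-path scan with a first-fit lexicographic depth-first search that accumulates the path cost incrementally and shares permutation prefixes, and drives the Floyd-Warshall preprocessing by one itertools.product pass with a min-update instead of three nested conditional loops.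
import Mathlib
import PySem

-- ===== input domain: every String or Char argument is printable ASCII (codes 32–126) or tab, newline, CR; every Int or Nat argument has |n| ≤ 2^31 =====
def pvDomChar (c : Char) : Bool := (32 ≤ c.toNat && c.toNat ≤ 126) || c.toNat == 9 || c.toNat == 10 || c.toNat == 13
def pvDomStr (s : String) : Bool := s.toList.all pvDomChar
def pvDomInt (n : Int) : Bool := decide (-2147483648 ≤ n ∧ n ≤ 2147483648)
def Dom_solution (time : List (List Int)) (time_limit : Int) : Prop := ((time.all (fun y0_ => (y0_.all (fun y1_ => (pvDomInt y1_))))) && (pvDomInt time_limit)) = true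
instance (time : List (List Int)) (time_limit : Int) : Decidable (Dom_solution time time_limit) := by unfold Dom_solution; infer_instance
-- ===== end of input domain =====

-- B replaces A's generate-every-permutation scan by a first-fit lexicographic DFS with an
-- incrementally accumulated path cost (objective: alternative). Both Pythons mutate `time`
-- in place identically (Floyd-Warshall); the equivalence proved here is about the RETURN value.

-- ===== PORT A =====

-- time[i][j] read with Python index semantics (negative index from the end); the 0 default
-- is never reached inside Pre_solution (Python raises IndexError exactly there)
def get2 (t : List (List Int)) (i j : Int) : Int :=
  (PySem.List.pyGet? ((PySem.List.pyGet? t i).getD []) j).getD 0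

-- time[i][j] = v for the nonnegative in-range indices the Floyd-Warshall loops produce
def set2 (t : List (List Int)) (i j : Int) (v : Int) : List (List Int) :=
  t.set i.toNat ((t.getD i.toNat []).set j.toNat v)

-- the three nested `for k/i/j in range(rows)` loops with the conditional in-place update
def fwA (t0 : List (List Int)) : List (List Int) :=
  let rows : Int := (t0.length : Int)
  (PySem.List.pyRange 0 rows 1).foldl (fun t k =>
    (PySem.List.pyRange 0 rows 1).foldl (fun t i =>
      (PySem.List.pyRange 0 rows 1).foldl (fun t j =>
        if get2 t i j > get2 t i k + get2 t k j
          then set2 t i j (get2 t i k + get2 t k j) else t) t) t) t0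

-- convert_to_path: consecutive pairs of [0] + perm + [-1]
def pairsOf : List Int → List (Int × Int)
  | a :: b :: rest => (a, b) :: pairsOf (b :: rest)
  | _ => []

-- the `for perm in itertools.permutations(...)` loop body: path cost, test, sorted return
def tryPermsA (t : List (List Int)) (tl : Int) : List (List Int) → Option (List Int)
  | [] => none
  | p :: ps =>
    let total := (pairsOf (0 :: p ++ [-1])).foldl (fun acc se => acc + get2 t se.1 se.2) 0
    if total ≤ tl then some (PySem.List.sorted (p.map (fun i => i - 1)) (fun x => x) false)
    else tryPermsA t tl ps

-- the outer `for i in reversed(range(bunnies + 1))` loop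
def sizesLoopA (t : List (List Int)) (tl : Int) (bunnies : Int) : List Int → List Int
  | [] => []
  | i :: rest =>
    match tryPermsA t tl (PySem.List.permutations (PySem.List.pyRange 1 (bunnies + 1) 1) i.toNat) with
    | some r => r
    | none => sizesLoopA t tl bunnies rest

def solution (time : List (List Int)) (time_limit : Int) : List Int :=
  let t := fwA time
  let bunnies : Int := (time.length : Int) - 2
  sizesLoopA t time_limit bunnies ((PySem.List.pyRange 0 (bunnies + 1) 1).reverse)

-- ===== PORT B =====

-- one `for k, i, j in itertools.product(range(n), repeat=3)` pass with a min-update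
def fwB (t0 : List (List Int)) : List (List Int) :=
  let n : Int := (t0.length : Int)
  ((PySem.List.pyRange 0 n 1).flatMap (fun k =>
    (PySem.List.pyRange 0 n 1).flatMap (fun i =>
      (PySem.List.pyRange 0 n 1).map (fun j => (k, i, j))))).foldl
    (fun t kij =>
      set2 t kij.2.1 kij.2.2
        (min (get2 t kij.2.1 kij.2.2) (get2 t kij.2.1 kij.1 + get2 t kij.1 kij.2.2))) t0

-- dfs(last, remaining, spent, need): first-fit lexicographic DFS; dfsTryB is its
-- `for idx, b in enumerate(remaining)` loop, `pre ++ rest` = remaining[:idx]+remaining[idx+1:]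
mutual
def dfsB (t : List (List Int)) (tl : Int) (last : Int) (rem : List Int) (spent : Int) :
    Nat → Option (List Int)
  | 0 => if spent + get2 t last (-1) ≤ tl then some [] else none
  | Nat.succ n => dfsTryB t tl last spent n [] rem
termination_by need => (need, 0)

def dfsTryB (t : List (List Int)) (tl : Int) (last spent : Int) (n : Nat)
    (pre : List Int) : List Int → Option (List Int)
  | [] => none
  | b :: rest =>
    match dfsB t tl b (pre ++ rest) (spent + get2 t last b) n with
    | some res => some (b :: res)
    | none => dfsTryB t tl last spent n (pre ++ [b]) rest
termination_by todo => (n, todo.length + 1)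
end

-- the `for size in reversed(range(bunnies + 1))` loop
def sizesLoopB (t : List (List Int)) (tl : Int) (bunnies : Int) : List Int → List Int
  | [] => []
  | i :: rest =>
    match dfsB t tl 0 (PySem.List.pyRange 1 (bunnies + 1) 1) 0 i.toNat with
    | some res => PySem.List.sorted (res.map (fun b => b - 1)) (fun x => x) false
    | none => sizesLoopB t tl bunnies rest

def solution_alt (time : List (List Int)) (time_limit : Int) : List Int :=
  let t := fwB time
  let bunnies : Int := (time.length : Int) - 2
  sizesLoopB t time_limit bunnies ((PySem.List.pyRange 0 (bunnies + 1) 1).reverse)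

-- ===== PRECONDITION & SPEC =====
-- Pre_ excludes exactly the ragged matrices with a row shorter than the number of rows,
-- on which both Pythons raise IndexError in the Floyd-Warshall phase.
def Pre_solution (time : List (List Int)) (time_limit : Int) : Prop :=
  ∀ row ∈ time, time.length ≤ row.length
instance (time : List (List Int)) (time_limit : Int) : Decidable (Pre_solution time time_limit) := by
  unfold Pre_solution; infer_instance
def pvWitness_solution : List (List Int) × Int := ([[0, 2, 2, 2], [9, 0, 1, 1], [9, 1, 0, 1], [9, 9, 9, 0]], 4)

def Spec_solution (time : List (List Int)) (time_limit : Int) (out : List Int) : Prop := out = solution_alt time time_limit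
instance (time : List (List Int)) (time_limit : Int) (out : List Int) : Decidable (Spec_solution time time_limit out) := by unfold Spec_solution; infer_instance

-- ===== CLAIM (what is proved, stated in full; the proofs are below) =====
def Claim_equal_solution : Prop := ∀ (time : List (List Int)) (time_limit : Int), Dom_solution time time_limit → Pre_solution time time_limit → Spec_solution time time_limit (solution time time_limit)

-- ===== LEMMAS AND PROOFS =====

-- first element of a list of candidate permutations whose total path cost fits, with the
-- cost written as the chain sum from `last` through the stops to the exit column -1
def chain (t : List (List Int)) (last : Int) : List Int → Int
  | [] => get2 t last (-1)
  | x :: xs => get2 t last x + chain t x xs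

def ffit (t : List (List Int)) (tl spent last : Int) : List (List Int) → Option (List Int)
  | [] => none
  | p :: ps => if spent + chain t last p ≤ tl then some p else ffit t tl spent last ps


-- setting a matrix entry to its current value is the identity (for the nonnegative
-- indices the Floyd-Warshall loops produce)
theorem set2_get2_self (t : List (List Int)) (i j : Int) (hi : 0 ≤ i) (hj : 0 ≤ j) :
    set2 t i j (get2 t i j) = t := by
  unfold set2 get2
  rw [PySem.List.pyGet?_of_nonneg t hi]
  cases hrow : t[i.toNat]? with
  | none =>
    have hlen : t.length ≤ i.toNat := by
      by_contra h
      exact absurd hrow (by simp [List.getElem?_eq_getElem (by omega : i.toNat < t.length)])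
    exact List.set_eq_of_length_le hlen
  | some row =>
    obtain ⟨hilen, hrow'⟩ := List.getElem?_eq_some_iff.mp hrow
    have hgetD : t.getD i.toNat [] = row := by simp [List.getD_eq_getElem?_getD, hrow]
    rw [hgetD]
    simp only [Option.getD_some]
    rw [PySem.List.pyGet?_of_nonneg row hj]
    cases hcell : row[j.toNat]? with
    | none =>
      have hjlen : row.length ≤ j.toNat := by
        by_contra h
        exact absurd hcell (by simp [List.getElem?_eq_getElem (by omega : j.toNat < row.length)])
      rw [List.set_eq_of_length_le hjlen, ← hrow']
      exact List.set_getElem_self hilen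
    | some v =>
      obtain ⟨hjlen, hcell'⟩ := List.getElem?_eq_some_iff.mp hcell
      simp only [Option.getD_some]
      rw [← hcell', List.set_getElem_self hjlen, ← hrow']
      exact List.set_getElem_self hilen

theorem fw_eq (t0 : List (List Int)) : fwB t0 = fwA t0 := by
  unfold fwA fwB
  simp only [List.foldl_flatMap, List.foldl_map]
  apply PySem.List.foldl_congr_mem
  intro t k _hk
  apply PySem.List.foldl_congr_mem
  intro t i hi
  apply PySem.List.foldl_congr_mem
  intro t j hj
  have hi0 : (0:Int) ≤ i := (PySem.List.mem_pyRange_one.mp hi).1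
  have hj0 : (0:Int) ≤ j := (PySem.List.mem_pyRange_one.mp hj).1
  by_cases h : get2 t i j > get2 t i k + get2 t k j
  · rw [if_pos h, min_eq_right (le_of_lt h)]
  · rw [if_neg h, min_eq_left (le_of_not_gt h), set2_get2_self t i j hi0 hj0]

-- the literal path-pair fold of A equals the chain sum
theorem pathCost_eq (t : List (List Int)) :
    ∀ (p : List Int) (last acc : Int),
      (pairsOf (last :: (p ++ [-1]))).foldl (fun acc se => acc + get2 t se.1 se.2) acc
        = acc + chain t last p := by
  intro p
  induction p with
  | nil => intro last acc; simp [pairsOf, chain]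
  | cons x xs ih =>
    intro last acc
    simp only [List.cons_append, pairsOf, List.foldl_cons, chain]
    rw [ih x (acc + get2 t last x)]
    ring

theorem tryPermsA_eq (t : List (List Int)) (tl : Int) (ps : List (List Int)) :
    tryPermsA t tl ps =
      (ffit t tl 0 0 ps).map (fun p => PySem.List.sorted (p.map (fun i => i - 1)) (fun x => x) false) := by
  induction ps with
  | nil => rfl
  | cons p ps ih =>
    simp only [tryPermsA, ffit, List.cons_append]
    simp only [pathCost_eq t p 0 0]
    split_ifs with h
    · rfl
    · exact ih

-- the "pick one element, keep the rest" spine shared by itertools.permutations and B's DFS loop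
def picksL (f : Int → List Int → List (List Int)) : List Int → List (List Int)
  | [] => []
  | x :: tl => f x tl ++ picksL (fun y ys => f y (x :: ys)) tl

theorem range_flatMap_eq_picksL :
    ∀ (xs : List Int) (f : Int → List Int → List (List Int)),
      (List.range xs.length).flatMap
        (fun i => (xs[i]?).elim [] (fun x => f x (xs.eraseIdx i)))
        = picksL f xs := by
  intro xs
  induction xs with
  | nil => intro f; rfl
  | cons x tl ih =>
    intro f
    rw [List.length_cons, List.range_succ_eq_map, List.flatMap_cons, List.flatMap_map]
    simp only [List.getElem?_cons_zero, List.eraseIdx_cons_zero, Nat.succ_eq_add_one,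
      List.getElem?_cons_succ, List.eraseIdx_cons_succ, Option.elim_some]
    rw [ih (fun y ys => f y (x :: ys))]
    rfl

theorem permutations_succ_eq_picksL (rem : List Int) (n : Nat) :
    PySem.List.permutations rem (n + 1)
      = picksL (fun x rest => (PySem.List.permutations rest n).map (fun p => x :: p)) rem := by
  rw [show n + 1 = Nat.succ n from rfl, PySem.List.permutations.eq_2,
    ← range_flatMap_eq_picksL rem (fun x rest => (PySem.List.permutations rest n).map (fun p => x :: p))]
  congr 1
  funext i
  cases rem[i]? <;> rfl

-- the exact list of candidate permutations B's DFS loop walks through, in order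
def permChunks (n : Nat) : List Int → List Int → List (List Int)
  | _pre, [] => []
  | pre, b :: rest =>
    ((PySem.List.permutations (pre ++ rest) n).map (fun p => b :: p)) ++ permChunks n (pre ++ [b]) rest

theorem permChunks_eq_picksL (n : Nat) :
    ∀ (todo pre : List Int),
      permChunks n pre todo
        = picksL (fun x rest => (PySem.List.permutations (pre ++ rest) n).map (fun p => x :: p)) todo := by
  intro todo
  induction todo with
  | nil => intro pre; rfl
  | cons b rest ih =>
    intro pre
    simp only [permChunks, picksL]
    rw [ih (pre ++ [b])]
    have hf : (fun (y : Int) (ys : List Int) =>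
          (PySem.List.permutations ((pre ++ [b]) ++ ys) n).map (fun p => y :: p))
        = (fun (y : Int) (ys : List Int) =>
          (PySem.List.permutations (pre ++ (b :: ys)) n).map (fun p => y :: p)) := by
      funext y ys
      rw [List.append_assoc]
      rfl
    rw [hf]

theorem ffit_append (t : List (List Int)) (tl spent last : Int) (xs ys : List (List Int)) :
    ffit t tl spent last (xs ++ ys) = (ffit t tl spent last xs).or (ffit t tl spent last ys) := by
  induction xs with
  | nil => rfl
  | cons p ps ih =>
    simp only [List.cons_append, ffit]
    split_ifs with h
    · rfl
    · exact ih

theorem ffit_map_cons (t : List (List Int)) (tl spent last x : Int) (ps : List (List Int)) :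
    ffit t tl spent last (ps.map (fun p => x :: p))
      = (ffit t tl (spent + get2 t last x) x ps).map (fun p => x :: p) := by
  induction ps with
  | nil => rfl
  | cons p ps ih =>
    simp only [List.map_cons, ffit]
    rw [show spent + chain t last (x :: p) = (spent + get2 t last x) + chain t x p by
      simp only [chain]; ring]
    split_ifs with h
    · rfl
    · exact ih

theorem dfsB_eq_ffit (t : List (List Int)) (tl : Int) :
    ∀ (n : Nat) (last : Int) (rem : List Int) (spent : Int),
      dfsB t tl last rem spent n = ffit t tl spent last (PySem.List.permutations rem n) := by
  intro n
  induction n with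
  | zero =>
    intro last rem spent
    rw [dfsB, PySem.List.permutations.eq_1]
    rfl
  | succ n ih =>
    intro last rem spent
    have S2 : ∀ (todo pre : List Int) (last spent : Int),
        dfsTryB t tl last spent n pre todo = ffit t tl spent last (permChunks n pre todo) := by
      intro todo
      induction todo with
      | nil => intro pre last spent; rw [dfsTryB]; rfl
      | cons b rest ihtodo =>
        intro pre last spent
        rw [dfsTryB]
        simp only [permChunks]
        rw [ffit_append, ffit_map_cons, ← ih, ← ihtodo]
        cases dfsB t tl b (pre ++ rest) (spent + get2 t last b) n <;> rfl
    rw [dfsB, S2 rem [] last spent, permChunks_eq_picksL, permutations_succ_eq_picksL]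
    simp only [List.nil_append]

theorem sizesLoop_eq (t : List (List Int)) (tl bunnies : Int) :
    ∀ (l : List Int), sizesLoopB t tl bunnies l = sizesLoopA t tl bunnies l := by
  intro l
  induction l with
  | nil => rfl
  | cons i rest ih =>
    simp only [sizesLoopA, sizesLoopB]
    rw [tryPermsA_eq, dfsB_eq_ffit]
    cases ffit t tl 0 0 (PySem.List.permutations (PySem.List.pyRange 1 (bunnies + 1) 1) i.toNat) with
    | none => simpa using ih
    | some res => rfl

-- ===== VERDICT (by name: the statement is the Claim_ definition above) =====
theorem solution_spec : Claim_equal_solution := by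
  intro time time_limit _hdom _hpre
  show solution time time_limit = solution_alt time time_limit
  unfold solution solution_alt
  rw [fw_eq, sizesLoop_eq]
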